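-- pv_equiv track=rewrite | github.com/rayonnant-ai/aicc | stackmaxxing/mimo.py | evaluate
-- ===== SOURCE A (Python) =====
-- def evaluate(board_rows, heights, n_cols, n_rows):
--     max_h = max(heights)
--     agg_h = sum(heights)
--
--     # Holes
--     holes = 0
--     for x in range(n_cols):
--         h = heights[x]
--         mask = 1 << x
--         for y in range(h):
--             if not (board_rows[y] & mask):
--                 holes += 1
--
--     # Bumpiness
--     bump = sum(abs(heights[i] - heights[i+1]) for i in range(n_cols - 1))
--
--     # Wells
--     wells = 0
--     for i in range(n_cols):
--         left = heights[i-1] if i > 0 else heights[i]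
--         right = heights[i+1] if i < n_cols - 1 else heights[i]
--         wd = min(left, right) - heights[i]
--         if wd > 0:
--             wells += wd
--
--     return -(100 * max_h + 50 * holes + 10 * bump + 5 * agg_h + 3 * wells)
-- ===== SOURCE B (Python) =====
-- def evaluate(board_rows, heights, n_cols, n_rows):
--     max_h = max(heights)
--     agg_h = sum(heights)
--     cols = heights[:max(n_cols, 0)]
--     clamped = [h if h > 0 else 0 for h in cols]
--
--     # Holes computed ROW-wise instead of cell-by-cell per column: holes =
--     # (cells under the skyline) - (filled cells under it), where the filled
--     # cells are counted with one popcount per row against a sweeping bitmask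
--     # of the columns whose height still exceeds the row (the per-height
--     # 'ends' table tells the sweep which columns to drop at each row).
--     m = max(clamped, default=0)
--     ends = [0] * (m + 1)
--     cover = 0
--     for x, h in enumerate(clamped):
--         if h > 0:
--             cover |= 1 << x
--             ends[h] |= 1 << x
--     filled = 0
--     for y in range(m):
--         filled += (board_rows[y] & cover).bit_count()
--         cover ^= ends[y + 1]
--     holes = sum(clamped) - filled
--
--     # Bumpiness: zip of adjacent pairs.
--     bump = sum(abs(a - b) for a, b in zip(cols, cols[1:]))
--
--     # Wells: pad with the edge columns and walk triples.
--     wells = 0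
--     if cols:
--         padded = [cols[0]] + cols + [cols[-1]]
--         wells = sum(max(0, min(l, r) - c) for l, c, r in zip(padded, cols, padded[2:]))
--
--     return -(100 * max_h + 50 * holes + 10 * bump + 5 * agg_h + 3 * wells)
-- ===== Notes on version B (the rewrite author's own statement) =====
-- stated objective: alternative
-- what changed: Holes are counted row-wise instead of cell-by-cell per column: B sweeps the rows once, keeping a bitmask of the columns whose height still exceeds the current row (updated from a precomputed per-height 'ends' table) and adds one popcount of (row & mask) per row, then subtracts the filled total from the cells under the skyline; bumpiness and wells come from zips over adjacent pairs / padded triples instead of index loops.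
import Mathlib
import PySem

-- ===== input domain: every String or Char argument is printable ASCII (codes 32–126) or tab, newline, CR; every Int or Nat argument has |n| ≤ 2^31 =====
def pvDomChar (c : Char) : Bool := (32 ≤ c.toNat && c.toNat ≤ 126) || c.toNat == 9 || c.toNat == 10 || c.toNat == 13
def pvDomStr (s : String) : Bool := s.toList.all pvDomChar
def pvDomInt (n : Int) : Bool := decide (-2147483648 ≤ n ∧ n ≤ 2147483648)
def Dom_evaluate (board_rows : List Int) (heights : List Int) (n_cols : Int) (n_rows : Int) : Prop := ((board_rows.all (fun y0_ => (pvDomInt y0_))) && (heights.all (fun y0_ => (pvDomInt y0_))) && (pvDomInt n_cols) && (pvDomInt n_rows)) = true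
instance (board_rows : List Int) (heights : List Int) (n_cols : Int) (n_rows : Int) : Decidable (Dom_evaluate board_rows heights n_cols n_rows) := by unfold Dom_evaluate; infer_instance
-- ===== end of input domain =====

-- B counts holes row-wise (one popcount of row & sweeping column bitmask per row,
-- subtracted from the cells under the skyline) instead of A's per-cell column scans,
-- and computes bumpiness/wells from zips over adjacent pairs / padded triples
-- (objective: alternative — a genuinely different traversal of the board).

-- ===== PORT A =====
def evaluate (board_rows : List Int) (heights : List Int) (n_cols : Int) (n_rows : Int) : Int :=
  match PySem.List.max? heights (fun x => x) with
  | none => 0  -- max([]) raises ValueError; excluded by Pre_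
  | some max_h =>
    let agg_h := heights.sum
    -- for x in range(n_cols): for y in range(heights[x]): if not (board_rows[y] & (1 << x)): holes += 1
    let holes := (PySem.List.pyRange 0 n_cols 1).foldl (fun holes x =>
        let h := PySem.List.pyGetD heights x 0
        let mask : Int := (1 : Int) <<< x.toNat  -- x ≥ 0 in range(n_cols), so 1 << x is exact
        (PySem.List.pyRange 0 h 1).foldl (fun holes y =>
          if PySem.Int.band (PySem.List.pyGetD board_rows y 0) mask = 0 then holes + 1
          else holes) holes) 0
    let bump := ((PySem.List.pyRange 0 (n_cols - 1) 1).map (fun i =>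
        |PySem.List.pyGetD heights i 0 - PySem.List.pyGetD heights (i + 1) 0|)).sum
    let wells := (PySem.List.pyRange 0 n_cols 1).foldl (fun wells i =>
        let left := if 0 < i then PySem.List.pyGetD heights (i - 1) 0 else PySem.List.pyGetD heights i 0
        let right := if i < n_cols - 1 then PySem.List.pyGetD heights (i + 1) 0 else PySem.List.pyGetD heights i 0
        let wd := min left right - PySem.List.pyGetD heights i 0
        if 0 < wd then wells + wd else wells) 0 ;
    -(100 * max_h + 50 * holes + 10 * bump + 5 * agg_h + 3 * wells)

-- ===== PORT B =====
-- body of Source B's ends/cover building loop ('for x, h in enumerate(clamped): …')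
def buildStep (p : List Int × Int) (xh : Int × Int) : List Int × Int :=
  if 0 < xh.2 then
    (PySem.List.pySetD p.1 xh.2
        (PySem.Int.bor (PySem.List.pyGetD p.1 xh.2 0) ((1 : Int) <<< xh.1.toNat)),
     PySem.Int.bor p.2 ((1 : Int) <<< xh.1.toNat))
  else p

-- body of Source B's row sweep ('for y in range(m): filled += …; cover ^= ends[y+1]')
def sweepStep (board_rows ends : List Int) (p : Int × Int) (y : Int) : Int × Int :=
  (p.1 + (PySem.Int.bitCount (PySem.Int.band (PySem.List.pyGetD board_rows y 0) p.2) : Int),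
   PySem.Int.bxor p.2 (PySem.List.pyGetD ends (y + 1) 0))

def evaluate_alt (board_rows : List Int) (heights : List Int) (n_cols : Int) (n_rows : Int) : Int :=
  match PySem.List.max? heights (fun x => x) with
  | none => 0  -- max([]) raises ValueError; excluded by Pre_
  | some max_h =>
    let agg_h := heights.sum
    let cols := PySem.List.slice heights none (some (max n_cols 0))
    let clamped := cols.map (fun h => if 0 < h then h else 0)
    let m := PySem.List.maxD clamped (fun x => x) 0          -- max(clamped, default=0)
    let ec := (PySem.List.enumerate clamped).foldl buildStep
        (List.replicate (m + 1).toNat 0, 0)                   -- ends = [0]*(m+1); cover = 0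
    let fc := (PySem.List.pyRange 0 m 1).foldl (sweepStep board_rows ec.1) (0, ec.2)
    let holes := clamped.sum - fc.1
    let bump := ((cols.zip (PySem.List.slice cols (some 1) none)).map (fun p => |p.1 - p.2|)).sum
    let wells :=
      if cols = [] then 0
      else
        let padded := [PySem.List.pyGetD cols 0 0] ++ cols ++ [PySem.List.pyGetD cols (-1) 0]
        ((padded.zip (cols.zip (PySem.List.slice padded (some 2) none))).map
          (fun t => max 0 (min t.1 t.2.2 - t.2.1))).sum ;
    -(100 * max_h + 50 * holes + 10 * bump + 5 * agg_h + 3 * wells)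

-- ===== PRECONDITION & SPEC =====
-- Pre_ = exactly where Python A returns: heights nonempty (max), every column index below
-- n_cols valid (heights[x]), and each such column height within board_rows (board_rows[y]).
def Pre_evaluate (board_rows : List Int) (heights : List Int) (n_cols : Int) (n_rows : Int) : Prop :=
  heights ≠ [] ∧ n_cols ≤ (heights.length : Int) ∧
  ∀ k : Nat, k < n_cols.toNat → heights.getD k 0 ≤ (board_rows.length : Int)
instance (board_rows : List Int) (heights : List Int) (n_cols : Int) (n_rows : Int) : Decidable (Pre_evaluate board_rows heights n_cols n_rows) := by unfold Pre_evaluate; infer_instance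

def pvWitness_evaluate : List Int × List Int × Int × Int := ([1], [1, 2], 1, 1)

def Spec_evaluate (board_rows : List Int) (heights : List Int) (n_cols : Int) (n_rows : Int) (out : Int) : Prop := out = evaluate_alt board_rows heights n_cols n_rows
instance (board_rows : List Int) (heights : List Int) (n_cols : Int) (n_rows : Int) (out : Int) : Decidable (Spec_evaluate board_rows heights n_cols n_rows out) := by unfold Spec_evaluate; infer_instance

-- ===== CLAIM (what is proved, stated in full; the proofs are below) =====
def Claim_equal_evaluate : Prop := ∀ (board_rows : List Int) (heights : List Int) (n_cols : Int) (n_rows : Int), Dom_evaluate board_rows heights n_cols n_rows → Pre_evaluate board_rows heights n_cols n_rows → Spec_evaluate board_rows heights n_cols n_rows (evaluate board_rows heights n_cols n_rows)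

-- ===== LEMMAS AND PROOFS =====

-- bit k of the integer v, with Python's infinite-two's-complement reading of negatives
def pybit (v : Int) (k : Nat) : Bool :=
  if 0 ≤ v then v.toNat.testBit k else !((-v - 1).toNat.testBit k)

-- the natural number whose bits below L are given by f
def maskOf : (Nat → Bool) → Nat → Nat
  | _, 0 => 0
  | f, L + 1 => (if f 0 then 1 else 0) + 2 * maskOf (fun k => f (k + 1)) L

theorem testBit_maskOf (f : Nat → Bool) (L j : Nat) :
    (maskOf f L).testBit j = (decide (j < L) && f j) := by
  induction L generalizing f j with
  | zero => simp [maskOf, Nat.zero_testBit]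
  | succ L ih =>
    cases j with
    | zero =>
      rw [maskOf, Nat.testBit_zero]
      by_cases h : f 0 <;> simp [h, Nat.add_mul_mod_self_left]
    | succ j =>
      rw [maskOf, Nat.testBit_add_one]
      have h2 : ((if f 0 then 1 else 0) + 2 * maskOf (fun k => f (k + 1)) L) / 2
          = maskOf (fun k => f (k + 1)) L := by
        by_cases h : f 0 <;> simp [h] <;> omega
      rw [h2, ih]
      simp only [Nat.succ_lt_succ_iff]

theorem maskOf_lt (f : Nat → Bool) (L : Nat) : maskOf f L < 2 ^ L := by
  induction L generalizing f with
  | zero => simp [maskOf]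
  | succ L ih =>
    have := ih (fun k => f (k + 1))
    rw [maskOf, pow_succ]
    by_cases h : f 0 <;> simp [h] <;> omega

theorem maskOf_congr (f g : Nat → Bool) (L : Nat) (h : ∀ k, k < L → f k = g k) :
    maskOf f L = maskOf g L := by
  induction L generalizing f g with
  | zero => rfl
  | succ L ih =>
    rw [maskOf, maskOf, h 0 (by omega), ih _ _ (fun k hk => h (k + 1) (by omega))]

theorem maskOf_false (L : Nat) : maskOf (fun _ => false) L = 0 := by
  induction L with
  | zero => rfl
  | succ L ih => rw [maskOf]; simpa using ih

theorem maskOf_add_disjoint (f g : Nat → Bool) (L : Nat)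
    (h : ∀ k, ¬(f k = true ∧ g k = true)) :
    maskOf f L + maskOf g L = maskOf (fun k => f k || g k) L := by
  induction L generalizing f g with
  | zero => rfl
  | succ L ih =>
    rw [maskOf, maskOf, maskOf]
    rw [← ih (fun k => f (k + 1)) (fun k => g (k + 1)) (fun k => h (k + 1))]
    have := h 0
    by_cases h1 : f 0 <;> by_cases h2 : g 0 <;> simp [h1, h2] at * <;> omega

theorem eq_maskOf (u L : Nat) (h : u < 2 ^ L) : maskOf u.testBit L = u := by
  apply Nat.eq_of_testBit_eq
  intro i
  rw [testBit_maskOf]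
  by_cases hi : i < L
  · simp [hi]
  · have : u < 2 ^ i := lt_of_lt_of_le h (Nat.pow_le_pow_right (by omega) (by omega))
    simp [hi, Nat.testBit_lt_two_pow this]

theorem land_eq_maskOf (u w L : Nat) (hu : u < 2 ^ L) :
    u &&& w = maskOf (fun k => u.testBit k && w.testBit k) L := by
  apply Nat.eq_of_testBit_eq
  intro i
  rw [Nat.testBit_land, testBit_maskOf]
  by_cases hi : i < L
  · simp [hi]
  · have : u < 2 ^ i := lt_of_lt_of_le hu (Nat.pow_le_pow_right (by omega) (by omega))
    simp [hi, Nat.testBit_lt_two_pow this]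

theorem sub_land_eq_maskOf (u w L : Nat) (hu : u < 2 ^ L) :
    u - (u &&& w) = maskOf (fun k => u.testBit k && !w.testBit k) L := by
  have hs : u &&& w = maskOf (fun k => u.testBit k && w.testBit k) L := land_eq_maskOf u w L hu
  have hadd : maskOf (fun k => u.testBit k && !w.testBit k) L +
      maskOf (fun k => u.testBit k && w.testBit k) L = u := by
    have hdisj : ∀ k, ¬((u.testBit k && !w.testBit k) = true ∧ (u.testBit k && w.testBit k) = true) := by
      intro k
      cases hu1 : u.testBit k <;> cases hw1 : w.testBit k <;> simp
    have hor : ∀ k, k < L →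
        ((u.testBit k && !w.testBit k) || (u.testBit k && w.testBit k)) = u.testBit k := by
      intro k _
      cases hu1 : u.testBit k <;> cases hw1 : w.testBit k <;> simp
    rw [maskOf_add_disjoint _ _ _ hdisj, maskOf_congr _ u.testBit L hor]
    exact eq_maskOf u L hu
  omega

theorem shl_one_cast (k : Nat) : (1 : Int) <<< k = ((2 ^ k : Nat) : Int) := by
  rw [Int.shiftLeft_eq]
  push_cast
  ring

theorem band_natCast_mask (v : Int) (u L : Nat) (hu : u < 2 ^ L) :
    PySem.Int.band v (u : Int) = ((maskOf (fun k => u.testBit k && pybit v k) L : Nat) : Int) := by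
  have hnn : (0 : Int) ≤ (u : Int) := by positivity
  by_cases hv : 0 ≤ v
  · have h1 : PySem.Int.band v (u : Int) = ((v.toNat &&& u : Nat) : Int) := by
      unfold PySem.Int.band
      rw [if_pos hv, if_pos hnn, Int.toNat_natCast]
    rw [h1]
    congr 1
    rw [Nat.land_comm, land_eq_maskOf u v.toNat L hu]
    exact maskOf_congr _ _ _ (by intro k _; simp [pybit, hv])
  · have h1 : PySem.Int.band v (u : Int) = ((u - (u &&& (-v - 1).toNat) : Nat) : Int) := by
      unfold PySem.Int.band
      rw [if_neg hv, if_pos hnn, Int.toNat_natCast]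
    rw [h1]
    congr 1
    rw [sub_land_eq_maskOf u (-v - 1).toNat L hu]
    exact maskOf_congr _ _ _ (by intro k _; simp [pybit, hv])

theorem bitCount_cast_eq_countP (u L : Nat) (h : u < 2 ^ L) :
    PySem.Int.bitCount (u : Int) = (List.range L).countP u.testBit := by
  induction L generalizing u with
  | zero =>
    have : u = 0 := by simpa using h
    simp [this, PySem.Int.bitCount_zero]
  | succ L ih =>
    by_cases hu : u = 0
    · subst hu
      rw [Nat.cast_zero, PySem.Int.bitCount_zero, eq_comm, List.countP_eq_zero]
      intro a _
      simp [Nat.zero_testBit]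
    · rw [PySem.Int.bitCount_natCast (by omega)]
      rw [List.range_succ_eq_map, List.countP_cons, List.countP_map]
      have hcongr : (List.range L).countP (u.testBit ∘ Nat.succ)
          = (List.range L).countP (u / 2).testBit := by
        apply List.countP_congr
        intro k _
        simp [Function.comp, Nat.testBit_add_one]
      rw [hcongr, ← ih (u / 2) (by rw [pow_succ] at h; omega)]
      rw [Nat.testBit_zero]
      by_cases hp : u % 2 = 1 <;> simp [hp] <;> omega

theorem band_shl (v : Int) (k : Nat) :
    PySem.Int.band v ((1 : Int) <<< k) = if pybit v k then ((2 ^ k : Nat) : Int) else 0 := by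
  rw [shl_one_cast]
  have hnn : (0 : Int) ≤ ((2 ^ k : Nat) : Int) := by positivity
  by_cases hv : 0 ≤ v
  · have h1 : PySem.Int.band v ((2 ^ k : Nat) : Int) = ((v.toNat &&& 2 ^ k : Nat) : Int) := by
      unfold PySem.Int.band
      rw [if_pos hv, if_pos hnn, Int.toNat_natCast]
    rw [h1, Nat.and_two_pow]
    simp only [pybit, hv, if_true]
    by_cases hb : v.toNat.testBit k <;> simp [hb]
  · have h1 : PySem.Int.band v ((2 ^ k : Nat) : Int)
        = ((2 ^ k - (2 ^ k &&& (-v - 1).toNat) : Nat) : Int) := by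
      unfold PySem.Int.band
      rw [if_neg hv, if_pos hnn, Int.toNat_natCast]
    rw [h1, Nat.land_comm, Nat.and_two_pow]
    by_cases hb : (-v - 1).toNat.testBit k
    · have hp : pybit v k = false := by unfold pybit; rw [if_neg hv, hb]; rfl
      rw [hp, hb]
      simp
    · have hp : pybit v k = true := by
        unfold pybit; rw [if_neg hv, Bool.eq_false_iff.mpr hb]; rfl
      rw [hp, Bool.eq_false_iff.mpr hb]
      simp

theorem band_shl_ne_zero (v : Int) (k : Nat) :
    (PySem.Int.band v ((1 : Int) <<< k) != 0) = pybit v k := by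
  rw [band_shl]
  by_cases hb : pybit v k
  · simp [hb]
  · simp [hb]

-- ---- abbreviations for the clamped column list ----
def cnL (c : List Int) (k : Nat) : Nat := (c.getD k 0).toNat

def endsEt (c : List Int) (M t : Nat) : List Int :=
  (List.range (M + 1)).map (fun j =>
    ((maskOf (fun k => decide (k < t) && decide (0 < cnL c k) && decide (cnL c k = j))
      c.length : Nat) : Int))

def coverEt (c : List Int) (t : Nat) : Int :=
  ((maskOf (fun k => decide (k < t) && decide (0 < cnL c k)) c.length : Nat) : Int)

def coverRow (c : List Int) (y : Nat) : Int :=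
  ((maskOf (fun k => decide (y < cnL c k)) c.length : Nat) : Int)

theorem init_le_foldl_max (l : List Nat) (a : Nat) : a ≤ l.foldl max a := by
  induction l generalizing a with
  | nil => simp
  | cons x t ih => exact le_trans (Nat.le_max_left a x) (ih (max a x))

theorem mem_le_foldl_max (l : List Nat) : ∀ (a x : Nat), x ∈ l → x ≤ l.foldl max a := by
  induction l with
  | nil => intro a x hx; simp at hx
  | cons y t ih =>
    intro a x hx
    rcases List.mem_cons.mp hx with h | h
    · subst h
      exact le_trans (Nat.le_max_right a x) (init_le_foldl_max t (max a x))
    · exact ih (max a y) x h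

theorem cast_foldl_max (l : List Nat) : ∀ a : Nat,
    (l.map (fun x : Nat => (x : Int))).foldl max ((a : Nat) : Int)
    = ((l.foldl max a : Nat) : Int) := by
  induction l with
  | nil => intro a; simp
  | cons x t ih =>
    intro a
    simp only [List.map_cons, List.foldl_cons]
    rw [← Nat.cast_max, ih]

theorem sum_map_add_int' {α : Type} (l : List α) (f g : α → Int) :
    (l.map (fun x => f x + g x)).sum = (l.map f).sum + (l.map g).sum := by
  induction l with
  | nil => simp
  | cons x t ih => simp [ih]; ring

theorem sum_map_sub_int {α : Type} (l : List α) (f g : α → Int) :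
    (l.map (fun x => f x - g x)).sum = (l.map f).sum - (l.map g).sum := by
  induction l with
  | nil => simp
  | cons x t ih => simp [ih]; ring

theorem sum_swap (g : Nat → Nat → Int) (Mm n : Nat) :
    ((List.range Mm).map (fun y => ((List.range n).map (g y)).sum)).sum
    = ((List.range n).map (fun k => ((List.range Mm).map (fun y => g y k)).sum)).sum := by
  induction Mm with
  | zero => simp
  | succ Mm ih =>
    rw [List.range_succ, List.map_append, List.sum_append, ih]
    have hr : ((List.range n).map (fun k => ((List.range Mm ++ [Mm]).map (fun y => g y k)).sum)).sum
        = ((List.range n).map (fun k => ((List.range Mm).map (fun y => g y k)).sum)).sum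
          + ((List.range n).map (fun k => g Mm k)).sum := by
      rw [← sum_map_add_int']
      refine congrArg List.sum (List.map_congr_left ?_)
      intro k _
      rw [List.map_append, List.sum_append]
      simp
    rw [hr]
    simp

theorem countP_cut (p : Nat → Bool) (cc : Nat) : ∀ Mm, cc ≤ Mm →
    (List.range Mm).countP (fun y => decide (y < cc) && p y) = (List.range cc).countP p := by
  intro Mm
  induction Mm with
  | zero =>
    intro h
    have h0 : cc = 0 := by omega
    subst h0
    rfl
  | succ Mm ih =>
    intro h
    by_cases hc : cc = Mm + 1
    · subst hc
      apply List.countP_congr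
      intro y hy
      rw [List.mem_range] at hy
      simp [hy]
    · have h2 : cc ≤ Mm := by omega
      rw [List.range_succ, List.countP_append, ih h2]
      simp [show ¬(Mm < cc) by omega]

theorem build_fold (c : List Int) (M : Nat)
    (hnn : ∀ k : Nat, 0 ≤ c.getD k 0) (hM : ∀ k : Nat, cnL c k ≤ M) (t : Nat)
    (ht : t ≤ c.length) :
    ((List.range t).map (fun k : Nat => ((k : Int), c.getD k 0))).foldl buildStep
      (List.replicate (M + 1) 0, 0)
    = (endsEt c M t, coverEt c t) := by
  induction t with
  | zero =>
    simp only [List.range_zero, List.map_nil, List.foldl_nil]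
    unfold endsEt coverEt
    have hz : ∀ j : Nat,
        maskOf (fun k => decide (k < 0) && decide (0 < cnL c k) && decide (cnL c k = j))
          c.length = 0 := by
      intro j
      rw [maskOf_congr _ (fun _ => false) _ (by intro k _; simp), maskOf_false]
    have hz2 : maskOf (fun k => decide (k < 0) && decide (0 < cnL c k)) c.length = 0 := by
      rw [maskOf_congr _ (fun _ => false) _ (by intro k _; simp), maskOf_false]
    rw [hz2]
    refine congrArg₂ Prod.mk ?_ (by simp)
    rw [List.map_congr_left (fun j _ => by rw [hz j]), List.map_const', List.length_range]
    simp
  | succ t ih =>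
    have ht' : t ≤ c.length := by omega
    have htlen : t < c.length := by omega
    rw [List.range_succ, List.map_append, List.foldl_append, ih ht']
    simp only [List.map_cons, List.map_nil, List.foldl_cons, List.foldl_nil]
    have hct : c.getD t 0 = ((cnL c t : Nat) : Int) := (Int.toNat_of_nonneg (hnn t)).symm
    by_cases hpos : 0 < cnL c t
    · have hcond : 0 < ((t : Int), c.getD t 0).2 := by
        show (0 : Int) < c.getD t 0
        rw [hct]
        exact_mod_cast hpos
      rw [buildStep, if_pos hcond]
      have htNat : (((t : Int), c.getD t 0).1).toNat = t := by simp
      refine congrArg₂ Prod.mk ?_ ?_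
      · -- ends component
        have hidx : cnL c t < M + 1 := by have := hM t; omega
        have hget : PySem.List.pyGetD (endsEt c M t) (((t : Int), c.getD t 0).2) 0
            = ((maskOf (fun k => decide (k < t) && decide (0 < cnL c k) &&
                decide (cnL c k = cnL c t)) c.length : Nat) : Int) := by
          rw [hct, PySem.List.pyGetD_natCast]
          unfold endsEt
          rw [List.getD_eq_getElem _ _ (by simp [hidx]), List.getElem_map, List.getElem_range]
        rw [hget, htNat, shl_one_cast, PySem.Int.bor_natCast]
        have hnew : (maskOf (fun k => decide (k < t) && decide (0 < cnL c k) &&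
              decide (cnL c k = cnL c t)) c.length) ||| 2 ^ t
            = maskOf (fun k => decide (k < t + 1) && decide (0 < cnL c k) &&
              decide (cnL c k = cnL c t)) c.length := by
          apply Nat.eq_of_testBit_eq
          intro i
          rw [Nat.testBit_or, testBit_maskOf, testBit_maskOf, Nat.testBit_two_pow]
          by_cases h1 : i = t
          · subst h1
            simp [htlen, hpos]
          · have e1 : decide (t = i) = false := by simp; omega
            have e2 : decide (i < t) = decide (i < t + 1) := decide_eq_decide.mpr (by omega)
            rw [e1, e2, Bool.or_false]
        rw [hct, PySem.List.pySetD_natCast, hnew]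
        unfold endsEt
        apply List.ext_getElem
        · simp
        · intro j hj1 hj2
          rw [List.getElem_set]
          simp only [List.getElem_map, List.getElem_range]
          have hjM : j < M + 1 := by simpa using hj2
          by_cases hjc : cnL c t = j
          · subst hjc
            simp
          · rw [if_neg hjc]
            congr 1
            apply maskOf_congr
            intro k _
            by_cases h1 : k = t
            · subst h1
              have : decide (cnL c k = j) = false := by simp [hjc]
              simp [this]
            · have e2 : decide (k < t) = decide (k < t + 1) := decide_eq_decide.mpr (by omega)
              rw [e2]
      · -- cover component
        rw [htNat, shl_one_cast]
        unfold coverEt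
        rw [PySem.Int.bor_natCast]
        congr 1
        apply Nat.eq_of_testBit_eq
        intro i
        rw [Nat.testBit_or, testBit_maskOf, testBit_maskOf, Nat.testBit_two_pow]
        by_cases h1 : i = t
        · subst h1
          simp [htlen, hpos]
        · have e1 : decide (t = i) = false := by simp; omega
          have e2 : decide (i < t) = decide (i < t + 1) := decide_eq_decide.mpr (by omega)
          rw [e1, e2, Bool.or_false]
    · have hcond : ¬ 0 < ((t : Int), c.getD t 0).2 := by
        show ¬ (0 : Int) < c.getD t 0
        rw [hct]
        exact_mod_cast hpos
      rw [buildStep, if_neg hcond]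
      refine congrArg₂ Prod.mk ?_ ?_
      · unfold endsEt
        refine List.map_congr_left ?_
        intro j _
        congr 1
        apply maskOf_congr
        intro k _
        by_cases h1 : k = t
        · subst h1
          have : decide (0 < cnL c k) = false := by simp [hpos]
          simp [this]
        · have e2 : decide (k < t) = decide (k < t + 1) := decide_eq_decide.mpr (by omega)
          rw [e2]
      · unfold coverEt
        congr 1
        apply maskOf_congr
        intro k _
        by_cases h1 : k = t
        · subst h1
          have : decide (0 < cnL c k) = false := by simp [hpos]
          simp [this]
        · have e2 : decide (k < t) = decide (k < t + 1) := decide_eq_decide.mpr (by omega)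
          rw [e2]

-- the row mask seen at step y, as a Nat
theorem coverRow_testBit (c : List Int) (y i : Nat) :
    (maskOf (fun k => decide (y < cnL c k)) c.length).testBit i
    = (decide (i < c.length) && decide (y < cnL c i)) := testBit_maskOf _ _ _

theorem rowCount (br c : List Int) (y : Nat) :
    PySem.Int.bitCount (PySem.Int.band (br.getD y 0)
      ((maskOf (fun k => decide (y < cnL c k)) c.length : Nat) : Int))
    = (List.range c.length).countP
        (fun k => decide (y < cnL c k) && pybit (br.getD y 0) k) := by
  rw [band_natCast_mask _ _ c.length (maskOf_lt _ _),
    bitCount_cast_eq_countP _ c.length (maskOf_lt _ _)]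
  apply List.countP_congr
  intro k hk
  rw [List.mem_range] at hk
  rw [testBit_maskOf, coverRow_testBit]
  simp [hk]

theorem sweep_fold (br c : List Int) (M : Nat) (t : Nat)
    (ht : t ≤ M) :
    ((List.range t).map (fun y : Nat => (0 : Int) + (y : Int))).foldl
      (sweepStep br (endsEt c M c.length)) (0, coverEt c c.length)
    = (((List.range t).map (fun y =>
          (((List.range c.length).countP
            (fun k => decide (y < cnL c k) && pybit (br.getD y 0) k) : Nat) : Int))).sum,
       coverRow c t) := by
  induction t with
  | zero =>
    simp only [List.range_zero, List.map_nil, List.foldl_nil, List.sum_nil]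
    refine congrArg₂ Prod.mk rfl ?_
    unfold coverEt coverRow
    congr 1
    apply maskOf_congr
    intro k hk
    simp [hk]
  | succ t ih =>
    have ht' : t ≤ M := by omega
    rw [List.range_succ, List.map_append, List.foldl_append, ih ht']
    simp only [List.map_cons, List.map_nil, List.foldl_cons, List.foldl_nil]
    rw [List.map_append, List.sum_append]
    simp only [List.map_cons, List.map_nil, List.sum_cons, List.sum_nil, add_zero]
    unfold sweepStep
    refine congrArg₂ Prod.mk ?_ ?_
    · -- filled component
      have hrow : PySem.List.pyGetD br ((0 : Int) + (t : Int)) 0 = br.getD t 0 := by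
        rw [zero_add, PySem.List.pyGetD_natCast]
      rw [hrow]
      unfold coverRow
      rw [rowCount]
    · -- cover component
      have hidx : ((0 : Int) + (t : Int)) + 1 = (((t + 1 : Nat) : Nat) : Int) := by push_cast; ring
      rw [hidx, PySem.List.pyGetD_natCast]
      have hget : (endsEt c M c.length).getD (t + 1) 0
          = ((maskOf (fun k => decide (k < c.length) && decide (0 < cnL c k) &&
              decide (cnL c k = t + 1)) c.length : Nat) : Int) := by
        unfold endsEt
        rw [List.getD_eq_getElem _ _ (by simp; omega), List.getElem_map, List.getElem_range]
      rw [hget]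
      unfold coverRow
      rw [PySem.Int.bxor_natCast]
      congr 1
      apply Nat.eq_of_testBit_eq
      intro i
      rw [Nat.testBit_xor, testBit_maskOf, testBit_maskOf, testBit_maskOf]
      by_cases hi : i < c.length
      · simp only [hi, decide_true, Bool.true_and]
        by_cases h1 : cnL c i = t + 1
        · have e1 : decide (t < cnL c i) = true := by simp; omega
          have e2 : decide (t + 1 < cnL c i) = false := by simp; omega
          have e3 : decide (0 < cnL c i) = true := by simp; omega
          simp [h1]
        · have e2 : decide (t < cnL c i) = decide (t + 1 < cnL c i) :=
            decide_eq_decide.mpr (by omega)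
          simp [h1, e2]
      · simp [hi]

-- abbreviation used only inside the proofs (A's per-column hole count)
def colHoles (board_rows : List Int) (hs : List Int) (k : Nat) : Int :=
  max (hs.getD k 0) 0 -
    (((board_rows.take (hs.getD k 0).toNat).countP
      (fun r => PySem.Int.band r ((1 : Int) <<< k) != 0) : Nat) : Int)

theorem countP_not_eq (l : List Int) (p : Int → Bool) :
    l.countP p + l.countP (fun r => !(p r)) = l.length := by
  induction l with
  | nil => simp
  | cons x t ih => by_cases h : p x <;> simp [h] <;> omega

theorem take_eq_map_range (l : List Int) (n : Nat) (h : n ≤ l.length) :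
    l.take n = (List.range n).map (fun k => l.getD k 0) := by
  apply List.ext_getElem
  · simp [h]
  · intro i h1 h2
    simp only [List.getElem_take, List.getElem_map, List.getElem_range]
    rw [List.getD_eq_getElem]

theorem inner_holes (br : List Int) (m h acc : Int) (hb : h ≤ (br.length : Int)) :
    (PySem.List.pyRange 0 h 1).foldl (fun a y =>
        if PySem.Int.band (PySem.List.pyGetD br y 0) m = 0 then a + 1 else a) acc
    = acc + (max h 0 -
        (((br.take h.toNat).countP (fun r => PySem.Int.band r m != 0) : Nat) : Int)) := by
  rw [PySem.List.pyRange_one, List.foldl_map]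
  simp only [zero_add, sub_zero, PySem.List.pyGetD_natCast]
  rw [PySem.List.foldl_ite_add_one (fun k => PySem.Int.band (br.getD k 0) m = 0)]
  have hc : (List.range h.toNat).countP (fun k => decide (PySem.Int.band (br.getD k 0) m = 0))
      = (br.take h.toNat).countP (fun r => decide (PySem.Int.band r m = 0)) := by
    rw [take_eq_map_range br h.toNat (by omega), List.countP_map]; rfl
  rw [hc]
  have h2 := countP_not_eq (br.take h.toNat) (fun r => decide (PySem.Int.band r m = 0))
  have hlen : (br.take h.toNat).length = h.toNat := by simp; omega
  have hmax : ((h.toNat : Int)) = max h 0 := Int.toNat_eq_max h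
  have h3 : (br.take h.toNat).countP (fun r => PySem.Int.band r m != 0)
      = (br.take h.toNat).countP (fun r => !(decide (PySem.Int.band r m = 0))) := by
    apply List.countP_congr; intro x _; simp [bne]
  rw [h3]
  omega

theorem toNat_max_zero (n : Int) : (max n 0).toNat = n.toNat := by
  rcases le_total n 0 with h | h
  · rw [max_eq_right h]; omega
  · rw [max_eq_left h]

theorem getD_take (l : List Int) (n k : Nat) (hk : k < n) :
    (l.take n).getD k 0 = l.getD k 0 := by
  by_cases h : k < l.length
  · rw [List.getD_eq_getElem _ _ (by simp; omega), List.getD_eq_getElem _ _ h, List.getElem_take]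
  · rw [List.getD_eq_default _ _ (by simp; omega), List.getD_eq_default _ _ (by omega)]

theorem holes_A (br hs : List Int) (N : Int)
    (hb : ∀ k : Nat, k < N.toNat → hs.getD k 0 ≤ (br.length : Int)) :
    (PySem.List.pyRange 0 N 1).foldl (fun holes x =>
      (PySem.List.pyRange 0 (PySem.List.pyGetD hs x 0) 1).foldl (fun holes y =>
        if PySem.Int.band (PySem.List.pyGetD br y 0) ((1 : Int) <<< x.toNat) = 0 then holes + 1
        else holes) holes) 0
    = ((List.range N.toNat).map (colHoles br hs)).sum := by
  rw [PySem.List.pyRange_one, List.foldl_map]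
  simp only [zero_add, sub_zero, PySem.List.pyGetD_natCast, Int.toNat_natCast]
  rw [PySem.List.foldl_congr_mem _ _ (fun a k => a + colHoles br hs k) _ ?_, PySem.List.foldl_add,
    zero_add]
  intro acc k hk
  rw [List.mem_range] at hk
  rw [inner_holes br _ _ acc (hb k hk)]
  rfl

-- row-wise holes: the sweep total equals the per-column total
theorem holes_B_total (br hs : List Int) (N : Int) (hN : N ≤ (hs.length : Int))
    (hb : ∀ k : Nat, k < N.toNat → hs.getD k 0 ≤ (br.length : Int)) :
    (let c := (hs.take N.toNat).map (fun h => if 0 < h then h else 0);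
     let m := PySem.List.maxD c (fun x => x) 0;
     let ec := (PySem.List.enumerate c).foldl buildStep (List.replicate (m + 1).toNat 0, 0);
     c.sum - ((PySem.List.pyRange 0 m 1).foldl (sweepStep br ec.1) (0, ec.2)).1)
    = ((List.range N.toNat).map (colHoles br hs)).sum := by
  simp only []
  set c : List Int := (hs.take N.toNat).map (fun h => if 0 < h then h else 0) with hc
  have hclen : c.length = N.toNat := by
    rw [hc, List.length_map, List.length_take]
    omega
  have hnnMem : ∀ x ∈ c, 0 ≤ x := by
    intro x hx
    rw [hc] at hx
    obtain ⟨h0, _, rfl⟩ := List.mem_map.mp hx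
    split <;> omega
  have hnn : ∀ k : Nat, 0 ≤ c.getD k 0 := by
    intro k
    by_cases hk : k < c.length
    · rw [List.getD_eq_getElem _ _ hk]
      exact hnnMem _ (List.getElem_mem hk)
    · rw [List.getD_eq_default _ _ (by omega)]
  set M : Nat := (c.map Int.toNat).foldl max 0 with hMdef
  have hM : ∀ k : Nat, cnL c k ≤ M := by
    intro k
    by_cases hk : k < c.length
    · apply mem_le_foldl_max
      unfold cnL
      rw [List.getD_eq_getElem _ _ hk]
      exact List.mem_map_of_mem (List.getElem_mem hk)
    · unfold cnL
      rw [List.getD_eq_default _ _ (by omega)]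
      exact Nat.zero_le _
  have hmax : PySem.List.maxD c (fun x => x) 0 = ((M : Nat) : Int) := by
    unfold PySem.List.maxD
    cases hcc : c with
    | nil =>
      rw [hMdef, hcc]
      rfl
    | cons c0 rest =>
      rw [PySem.List.max?_id_cons]
      simp only [Option.getD_some]
      have hc0 : 0 ≤ c0 := hnnMem c0 (by rw [hcc]; exact List.mem_cons_self)
      have hrest : (rest.map Int.toNat).map (fun x : Nat => (x : Int)) = rest := by
        rw [List.map_map]
        have : ∀ x ∈ rest, (Int.toNat x : Int) = x := by
          intro x hx
          exact Int.toNat_of_nonneg (hnnMem x (by rw [hcc]; exact List.mem_cons_of_mem _ hx))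
        calc rest.map ((fun x : Nat => (x : Int)) ∘ Int.toNat)
            = rest.map id := List.map_congr_left (fun x hx => this x hx)
          _ = rest := List.map_id rest
      have hc0' : c0 = ((c0.toNat : Nat) : Int) := (Int.toNat_of_nonneg hc0).symm
      rw [← hrest]
      conv_lhs => rw [hc0']
      rw [cast_foldl_max]
      congr 1
      rw [hMdef, hcc]
      simp only [List.map_cons, List.foldl_cons, Nat.zero_max]
  have hrep : (((M : Nat) : Int) + 1).toNat = M + 1 := by omega
  have henum : PySem.List.enumerate c
      = (List.range c.length).map (fun k : Nat => ((k : Int), c.getD k 0)) := by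
    rw [PySem.List.enumerate_eq_map_pyRange c 0, PySem.List.pyRange_one]
    simp only [PySem.List.len_eq, sub_zero, Int.toNat_natCast, List.map_map]
    refine List.map_congr_left ?_
    intro k hk
    simp only [Function.comp_apply, zero_add, PySem.List.pyGetD_natCast]
  rw [hmax, hrep, henum, build_fold c M hnn hM c.length (le_refl _)]
  rw [PySem.List.pyRange_one]
  have hMt : (((M : Nat) : Int) - 0).toNat = M := by omega
  rw [hMt, sweep_fold br c M M (le_refl _)]
  simp only [hclen]
  -- swap the double count
  have hswap : ((List.range M).map (fun y =>
        (((List.range N.toNat).countP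
          (fun k => decide (y < cnL c k) && pybit (br.getD y 0) k) : Nat) : Int))).sum
      = ((List.range N.toNat).map (fun k =>
        (((List.range M).countP
          (fun y => decide (y < cnL c k) && pybit (br.getD y 0) k) : Nat) : Int))).sum := by
    have h1 : ((List.range M).map (fun y =>
          (((List.range N.toNat).countP
            (fun k => decide (y < cnL c k) && pybit (br.getD y 0) k) : Nat) : Int))).sum
        = ((List.range M).map (fun y => ((List.range N.toNat).map
            (fun k => if (decide (y < cnL c k) && pybit (br.getD y 0) k) = true
              then (1 : Int) else 0)).sum)).sum := by
      refine congrArg List.sum (List.map_congr_left ?_)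
      intro y _
      exact (PySem.List.sum_map_ite_one_zero _ _).symm
    rw [h1, sum_swap (fun y k => if (decide (y < cnL c k) && pybit (br.getD y 0) k) = true
          then (1 : Int) else 0) M N.toNat]
    refine congrArg List.sum (List.map_congr_left ?_)
    intro k _
    exact PySem.List.sum_map_ite_one_zero _ _
  rw [hswap]
  -- cut each column's count at its height
  have hcut : ∀ k, k ∈ List.range N.toNat →
      (((List.range M).countP
        (fun y => decide (y < cnL c k) && pybit (br.getD y 0) k) : Nat) : Int)
      = (((List.range (cnL c k)).countP (fun y => pybit (br.getD y 0) k) : Nat) : Int) := by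
    intro k _
    exact congrArg _ (countP_cut (fun y => pybit (br.getD y 0) k) (cnL c k) M (hM k))
  rw [List.map_congr_left hcut]
  -- the clamped sum, column by column
  have hself : c = (List.range c.length).map (fun k => c.getD k 0) := by
    conv_lhs => rw [← List.take_length (l := c)]
    exact take_eq_map_range c c.length (le_refl _)
  have hsum : c.sum = ((List.range N.toNat).map (fun k => ((cnL c k : Nat) : Int))).sum := by
    conv_lhs => rw [hself]
    rw [hclen]
    refine congrArg List.sum (List.map_congr_left ?_)
    intro k _
    exact (Int.toNat_of_nonneg (hnn k)).symm
  rw [hsum, ← sum_map_sub_int]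
  -- identify each term with A's per-column hole count
  refine congrArg List.sum (List.map_congr_left ?_)
  intro k hk
  rw [List.mem_range] at hk
  have hkhs : k < hs.length := by omega
  have hck0 : c.getD k 0 = (if 0 < hs.getD k 0 then hs.getD k 0 else 0) := by
    rw [hc, List.getD_eq_getElem _ _ (by rw [List.length_map, List.length_take]; omega),
      List.getElem_map, List.getElem_take, ← List.getD_eq_getElem]
  have hcnk : cnL c k = (hs.getD k 0).toNat := by
    unfold cnL
    rw [hck0]
    split <;> omega
  unfold colHoles
  rw [hcnk]
  have hble : (hs.getD k 0).toNat ≤ br.length := by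
    have := hb k hk
    omega
  have hcountP : (br.take (hs.getD k 0).toNat).countP
        (fun r => PySem.Int.band r ((1 : Int) <<< k) != 0)
      = (List.range (hs.getD k 0).toNat).countP (fun y => pybit (br.getD y 0) k) := by
    rw [take_eq_map_range br _ hble, List.countP_map]
    refine List.countP_congr ?_
    intro y _
    simp only [Function.comp_apply]
    rw [band_shl_ne_zero]
  rw [hcountP]
  have hmaxeq : max (hs.getD k 0) 0 = (((hs.getD k 0).toNat : Nat) : Int) :=
    (Int.toNat_eq_max (hs.getD k 0)).symm
  rw [hmaxeq]

theorem bump_A (hs : List Int) (N : Int) :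
    ((PySem.List.pyRange 0 (N - 1) 1).map (fun i =>
      |PySem.List.pyGetD hs i 0 - PySem.List.pyGetD hs (i + 1) 0|)).sum
    = ((List.range (N - 1).toNat).map (fun k => |hs.getD k 0 - hs.getD (k + 1) 0|)).sum := by
  rw [PySem.List.pyRange_one, List.map_map]
  simp only [sub_zero]
  refine congrArg List.sum (List.map_congr_left ?_)
  intro k hk
  have h1 : ((k : Int)) + 1 = ((k + 1 : Nat) : Int) := by push_cast; ring
  simp only [Function.comp_apply, zero_add]
  rw [h1, PySem.List.pyGetD_natCast, PySem.List.pyGetD_natCast]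

theorem zip_tail (l : List Int) :
    l.zip l.tail = (List.range (l.length - 1)).map (fun k => (l.getD k 0, l.getD (k + 1) 0)) := by
  apply List.ext_getElem
  · simp
  · intro i h1 h2
    have hlen : i < l.length - 1 := by simp at h1; omega
    rw [List.getElem_zip, List.getElem_map, List.getElem_range,
      List.getD_eq_getElem _ _ (show i < l.length by omega),
      List.getD_eq_getElem _ _ (show i + 1 < l.length by omega), List.getElem_tail]

theorem bump_B (hs : List Int) (N : Int) (hN : N ≤ (hs.length : Int)) :
    (((PySem.List.slice hs none (some (max N 0))).zip
        (PySem.List.slice (PySem.List.slice hs none (some (max N 0))) (some 1) none)).map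
      (fun p => |p.1 - p.2|)).sum
    = ((List.range (N - 1).toNat).map (fun k => |hs.getD k 0 - hs.getD (k + 1) 0|)).sum := by
  rw [PySem.List.slice_to hs (le_max_right N 0), PySem.List.slice_from_one, zip_tail, List.map_map]
  simp only [List.length_take, toNat_max_zero]
  have h1 : min N.toNat hs.length - 1 = (N - 1).toNat := by omega
  rw [h1]
  refine congrArg List.sum (List.map_congr_left ?_)
  intro k hk
  rw [List.mem_range] at hk
  simp only [Function.comp_apply]
  rw [getD_take hs N.toNat k (by omega), getD_take hs N.toNat (k + 1) (by omega)]

def wellContrib (hs : List Int) (K : Nat) (k : Nat) : Int :=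
  max 0 (min (if 0 < k then hs.getD (k - 1) 0 else hs.getD k 0)
             (if k + 1 < K then hs.getD (k + 1) 0 else hs.getD k 0) - hs.getD k 0)

theorem wells_A (hs : List Int) (N : Int) :
    (PySem.List.pyRange 0 N 1).foldl (fun wells i =>
      let left := if 0 < i then PySem.List.pyGetD hs (i - 1) 0 else PySem.List.pyGetD hs i 0
      let right := if i < N - 1 then PySem.List.pyGetD hs (i + 1) 0 else PySem.List.pyGetD hs i 0
      let wd := min left right - PySem.List.pyGetD hs i 0
      if 0 < wd then wells + wd else wells) 0
    = ((List.range N.toNat).map (wellContrib hs N.toNat)).sum := by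
  rw [PySem.List.pyRange_one, List.foldl_map]
  simp only [sub_zero]
  rw [PySem.List.foldl_congr_mem _ _ (fun acc k => acc + wellContrib hs N.toNat k) _ ?_,
    PySem.List.foldl_add, zero_add]
  intro acc k hk
  rw [List.mem_range] at hk
  dsimp only
  have hL : (if 0 < ((0 : Int) + k) then PySem.List.pyGetD hs ((0 : Int) + k - 1) 0
      else PySem.List.pyGetD hs ((0 : Int) + k) 0)
      = (if 0 < k then hs.getD (k - 1) 0 else hs.getD k 0) := by
    by_cases h0 : 0 < k
    · rw [if_pos (by omega), if_pos h0]
      have : ((0 : Int) + k - 1) = ((k - 1 : Nat) : Int) := by omega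
      rw [this, PySem.List.pyGetD_natCast]
    · rw [if_neg (by omega), if_neg h0]
      have : ((0 : Int) + k) = ((k : Nat) : Int) := by omega
      rw [this, PySem.List.pyGetD_natCast]
  have hR : (if ((0 : Int) + k) < N - 1 then PySem.List.pyGetD hs ((0 : Int) + k + 1) 0
      else PySem.List.pyGetD hs ((0 : Int) + k) 0)
      = (if k + 1 < N.toNat then hs.getD (k + 1) 0 else hs.getD k 0) := by
    by_cases h0 : k + 1 < N.toNat
    · rw [if_pos (by omega), if_pos h0]
      have : ((0 : Int) + k + 1) = ((k + 1 : Nat) : Int) := by omega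
      rw [this, PySem.List.pyGetD_natCast]
    · rw [if_neg (by omega), if_neg h0]
      have : ((0 : Int) + k) = ((k : Nat) : Int) := by omega
      rw [this, PySem.List.pyGetD_natCast]
  rw [hL, hR]
  have hC : PySem.List.pyGetD hs ((0 : Int) + k) 0 = hs.getD k 0 := by
    have : ((0 : Int) + k) = ((k : Nat) : Int) := by omega
    rw [this, PySem.List.pyGetD_natCast]
  rw [hC]
  unfold wellContrib
  set L := (if 0 < k then hs.getD (k - 1) 0 else hs.getD k 0) with hLdef
  set R := (if k + 1 < N.toNat then hs.getD (k + 1) 0 else hs.getD k 0) with hRdef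
  by_cases hw : 0 < min L R - hs.getD k 0
  · rw [if_pos hw, max_eq_right (le_of_lt hw)]
  · rw [if_neg hw, max_eq_left (not_lt.mp hw), add_zero]

theorem getD_eq_getElem' (l : List Int) (i j : Nat) (hj : j < l.length) (hij : i = j) :
    l[j]'hj = l.getD i 0 := by
  subst hij
  exact (List.getD_eq_getElem l 0 hj).symm

theorem padded_zip (l : List Int) (hl : l ≠ []) :
    (([l.getD 0 0] ++ l ++ [l.getLast hl]).zip
      (l.zip (([l.getD 0 0] ++ l ++ [l.getLast hl]).drop 2)))
    = (List.range l.length).map (fun k =>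
        ((if 0 < k then l.getD (k - 1) 0 else l.getD k 0), l.getD k 0,
         (if k + 1 < l.length then l.getD (k + 1) 0 else l.getD k 0))) := by
  apply List.ext_getElem
  · simp only [List.length_zip, List.length_drop, List.length_append, List.length_cons,
      List.length_map, List.length_range, List.singleton_append]
    omega
  · intro i h1 h2
    have hi : i < l.length := by
      simp only [List.length_zip, List.length_drop, List.length_append, List.length_cons,
        List.singleton_append] at h1
      omega
    rw [List.getElem_zip, List.getElem_zip, List.getElem_map, List.getElem_range, List.getElem_drop]
    simp only [List.singleton_append, List.getElem_cons, List.getElem_append,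
      List.getLast_eq_getElem, List.length_cons]
    refine congrArg₂ Prod.mk ?_ (congrArg₂ Prod.mk (getD_eq_getElem' l i i hi rfl) ?_)
    · split_ifs <;>
        first
          | (exfalso; omega)
          | rfl
          | (congr 1; omega)
          | (exact getD_eq_getElem' l _ _ _ (by omega))
    · split_ifs <;>
        first
          | (exfalso; omega)
          | rfl
          | (exact getD_eq_getElem' l _ _ _ (by omega))

theorem wells_B (hs : List Int) (N : Int) (hN : N ≤ (hs.length : Int)) :
    (if hs.take N.toNat = [] then 0
     else
       ((([(hs.take N.toNat).getD 0 0] ++ hs.take N.toNat ++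
            [PySem.List.pyGetD (hs.take N.toNat) (-1) 0]).zip
          ((hs.take N.toNat).zip
            (PySem.List.slice ([(hs.take N.toNat).getD 0 0] ++ hs.take N.toNat ++
              [PySem.List.pyGetD (hs.take N.toNat) (-1) 0]) (some 2) none))).map
        (fun t => max 0 (min t.1 t.2.2 - t.2.1))).sum)
    = ((List.range N.toNat).map (wellContrib hs N.toNat)).sum := by
  by_cases hc : hs.take N.toNat = []
  · rw [if_pos hc]
    have hK : N.toNat = 0 := by
      rcases List.take_eq_nil_iff.mp hc with h | h
      · omega
      · subst h
        simp at hN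
        omega
    rw [hK]
    simp
  · rw [if_neg hc]
    have hKpos : 0 < N.toNat := by
      by_contra h
      have : N.toNat = 0 := by omega
      apply hc
      rw [this]
      simp
    have hlen : (hs.take N.toNat).length = N.toNat := by rw [List.length_take]; omega
    rw [PySem.List.pyGetD_neg_one _ 0 hc]
    rw [PySem.List.slice_from _ (by norm_num : (0:Int) ≤ 2)]
    have h2 : (2 : Int).toNat = 2 := rfl
    rw [h2, padded_zip _ hc, List.map_map, hlen]
    refine congrArg List.sum (List.map_congr_left ?_)
    intro k hk
    rw [List.mem_range] at hk
    simp only [Function.comp_apply]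
    unfold wellContrib
    have e1 := getD_take hs N.toNat k hk
    have e2 := getD_take hs N.toNat (k - 1) (by omega)
    by_cases h1 : k + 1 < N.toNat
    · have e3 := getD_take hs N.toNat (k + 1) (by omega)
      simp only [if_pos h1, e1, e2, e3]
    · simp only [if_neg h1, e1, e2]

-- ===== VERDICT (by name: the statement is the Claim_ definition above) =====
theorem evaluate_spec : Claim_equal_evaluate := by
  intro br hs N R _hdom hpre
  obtain ⟨hne, hN, hb⟩ := hpre
  unfold Spec_evaluate evaluate evaluate_alt
  cases hmax : PySem.List.max? hs (fun x => x) with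
  | none => rfl
  | some m =>
    simp only []
    rw [holes_A br hs N hb, bump_A hs N, wells_A hs N, bump_B hs N hN,
      PySem.List.slice_to hs (le_max_right N 0), toNat_max_zero N, PySem.List.pyGetD_zero,
      wells_B hs N hN]
    have hh := holes_B_total br hs N hN hb
    simp only [] at hh
    rw [hh]
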